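-- pv_equiv track=rewrite | github.com/SelinCelk12/Python_cough_datas_process | weighted_automation_with_two_options.py | calculate_confusion_by_criteria
-- ===== SOURCE A (Python) =====
-- def calculate_confusion_by_criteria(true_events, pred_events, tolerance, criteria='tolerance'):
--     """
--     Belirtilen kriterlere göre kargaşa matrisini hesaplar.
--     criteria: 'tolerance' veya 'overlap' olabilir.
--     """
--     TP = FN = FP = 0
--     matched_pred_indices = set()
--
--     for ts, te in true_events:
--         found_match = False
--         for j, (ps, pe) in enumerate(pred_events):
--             if j in matched_pred_indices:
--                 continue
--
--             is_match = False
--             if criteria == 'tolerance':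
--                 # Sadece tolerans kriterine göre eşleşme kontrolü
--                 if abs(ps - ts) <= tolerance:
--                     is_match = True
--             elif criteria == 'overlap':
--                 # Sadece örtüşme (overlap) kriterine göre eşleşme kontrolü
--                 if min(te, pe) > max(ts, ps):
--                     is_match = True
--
--             if is_match:
--                 TP += 1
--                 matched_pred_indices.add(j)
--                 found_match = True
--                 break
--
--         if not found_match:
--             FN += 1
--
--     FP = len(pred_events) - len(matched_pred_indices)
--     return TP, FN, FP
-- ===== SOURCE B (Python) =====
-- def calculate_confusion_by_criteria(true_events, pred_events, tolerance, criteria='tolerance'):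
--     """Same counts via a shrinking list of unmatched predictions; TP/FN/FP derived arithmetically."""
--     if criteria == 'tolerance':
--         match = lambda t, p: abs(p[0] - t[0]) <= tolerance
--     elif criteria == 'overlap':
--         match = lambda t, p: min(t[1], p[1]) > max(t[0], p[0])
--     else:
--         match = lambda t, p: False
--     remaining = list(pred_events)
--     tp = 0
--     for t in true_events:
--         for k in range(len(remaining)):
--             if match(t, remaining[k]):
--                 del remaining[k]
--                 tp += 1
--                 break
--     return tp, len(true_events) - tp, len(remaining)
-- ===== Notes on version B (the rewrite author's own statement) =====
-- stated objective: simpler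
-- what changed: B selects the match predicate once, keeps a shrinking list of unmatched predictions from which the first match is deleted (instead of A's enumerate scan that re-visits matched entries and skips them via an index set), and derives FN and FP arithmetically as len(true)-TP and len(remaining).
import Mathlib
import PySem

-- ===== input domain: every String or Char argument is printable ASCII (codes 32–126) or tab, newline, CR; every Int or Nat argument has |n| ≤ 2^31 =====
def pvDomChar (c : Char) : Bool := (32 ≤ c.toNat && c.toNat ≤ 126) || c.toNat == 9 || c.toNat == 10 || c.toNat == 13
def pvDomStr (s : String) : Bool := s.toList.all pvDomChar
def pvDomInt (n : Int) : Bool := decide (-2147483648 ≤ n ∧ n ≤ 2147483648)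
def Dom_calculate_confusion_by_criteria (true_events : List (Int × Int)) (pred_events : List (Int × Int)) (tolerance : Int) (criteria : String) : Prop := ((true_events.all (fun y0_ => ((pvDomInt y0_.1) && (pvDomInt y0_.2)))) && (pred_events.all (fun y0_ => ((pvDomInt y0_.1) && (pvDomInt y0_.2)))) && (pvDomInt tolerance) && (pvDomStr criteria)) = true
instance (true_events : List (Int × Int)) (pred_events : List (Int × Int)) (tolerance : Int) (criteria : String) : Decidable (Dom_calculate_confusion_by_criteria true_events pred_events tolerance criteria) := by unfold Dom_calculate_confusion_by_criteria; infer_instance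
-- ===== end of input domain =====

-- B keeps a shrinking list of unmatched predictions (first match deleted) instead of A's
-- enumerate scan with a matched-index set, deriving FN and FP arithmetically; simpler, same result.

-- ===== PORT A =====
-- is_match for one (true, pred) pair: A's branch ladder on `criteria`
def pvA_isMatch (tolerance : Int) (criteria : String) (ts te ps pe : Int) : Bool :=
  if criteria == "tolerance" then
    decide (|ps - ts| ≤ tolerance)
  else if criteria == "overlap" then
    decide (min te pe > max ts ps)
  else
    false

-- inner `for j, (ps, pe) in enumerate(pred_events)` with continue / break: the matched index, if any
def pvA_findMatch (matched : PySem.Set Int) (tolerance : Int) (criteria : String)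
    (ts te : Int) : List (Int × Int × Int) → Option Int
  | [] => none
  | (j, p) :: rest =>
    if PySem.Set.contains matched j then
      pvA_findMatch matched tolerance criteria ts te rest
    else if pvA_isMatch tolerance criteria ts te p.1 p.2 then
      some j
    else
      pvA_findMatch matched tolerance criteria ts te rest

-- outer `for ts, te in true_events` over the state (TP, FN, matched_pred_indices)
def pvA_loop (E : List (Int × Int × Int)) (tolerance : Int) (criteria : String) :
    List (Int × Int) → Int × Int × PySem.Set Int → Int × Int × PySem.Set Int
  | [], st => st
  | t :: ts, st =>
    match pvA_findMatch st.2.2 tolerance criteria t.1 t.2 E with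
    | some j => pvA_loop E tolerance criteria ts (st.1 + 1, st.2.1, PySem.Set.add st.2.2 j)
    | none => pvA_loop E tolerance criteria ts (st.1, st.2.1 + 1, st.2.2)

def calculate_confusion_by_criteria (true_events : List (Int × Int)) (pred_events : List (Int × Int)) (tolerance : Int) (criteria : String) : Int × Int × Int :=
  let st := pvA_loop (PySem.List.enumerate pred_events 0) tolerance criteria true_events
    (0, 0, PySem.Set.empty)
  (st.1, st.2.1, (pred_events.length : Int) - (st.2.2.length : Int))

-- ===== PORT B =====
-- `del remaining[k]` at the first k with a match, as structural recursion (none = no match)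
def pvB_removeFirst (f : Int × Int → Bool) : List (Int × Int) → Option (List (Int × Int))
  | [] => none
  | p :: rest =>
    if f p then some rest
    else (pvB_removeFirst f rest).map (fun r => p :: r)

-- `for t in true_events` over the state (tp, remaining)
def pvB_loop (m : Int × Int → Int × Int → Bool) :
    List (Int × Int) → Int × List (Int × Int) → Int × List (Int × Int)
  | [], st => st
  | t :: ts, st =>
    match pvB_removeFirst (m t) st.2 with
    | some r => pvB_loop m ts (st.1 + 1, r)
    | none => pvB_loop m ts st

def calculate_confusion_by_criteria_alt (true_events : List (Int × Int)) (pred_events : List (Int × Int)) (tolerance : Int) (criteria : String) : Int × Int × Int :=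
  let m : Int × Int → Int × Int → Bool :=
    if criteria == "tolerance" then fun t p => decide (|p.1 - t.1| ≤ tolerance)
    else if criteria == "overlap" then fun t p => decide (min t.2 p.2 > max t.1 p.1)
    else fun _ _ => false
  let st := pvB_loop m true_events (0, pred_events)
  (st.1, (true_events.length : Int) - st.1, (st.2.length : Int))

-- ===== PRECONDITION & SPEC =====
def Spec_calculate_confusion_by_criteria (true_events : List (Int × Int)) (pred_events : List (Int × Int)) (tolerance : Int) (criteria : String) (out : Int × Int × Int) : Prop := out = calculate_confusion_by_criteria_alt true_events pred_events tolerance criteria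
instance (true_events : List (Int × Int)) (pred_events : List (Int × Int)) (tolerance : Int) (criteria : String) (out : Int × Int × Int) : Decidable (Spec_calculate_confusion_by_criteria true_events pred_events tolerance criteria out) := by unfold Spec_calculate_confusion_by_criteria; infer_instance

-- ===== CLAIM (what is proved, stated in full; the proofs are below) =====
def Claim_equal_calculate_confusion_by_criteria : Prop := ∀ (true_events : List (Int × Int)) (pred_events : List (Int × Int)) (tolerance : Int) (criteria : String), Dom_calculate_confusion_by_criteria true_events pred_events tolerance criteria → Spec_calculate_confusion_by_criteria true_events pred_events tolerance criteria (calculate_confusion_by_criteria true_events pred_events tolerance criteria)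

-- ===== LEMMAS AND PROOFS =====

-- B's remaining list, expressed through A's state: the preds whose index is not yet matched
def pvRem (M : PySem.Set Int) (E : List (Int × Int × Int)) : List (Int × Int) :=
  (E.filter (fun x => !(PySem.Set.contains M x.1))).map (fun x => x.2)

theorem pvRem_add_not_mem (M : PySem.Set Int) (j : Int) (E : List (Int × Int × Int))
    (h : j ∉ E.map (fun x => x.1)) : pvRem (PySem.Set.add M j) E = pvRem M E := by
  unfold pvRem
  congr 1
  apply List.filter_congr
  intro x hx
  have hne : x.1 ≠ j := by
    intro e; exact h (List.mem_map.mpr ⟨x, hx, e⟩)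
  simp [PySem.Set.mem_add, hne]

theorem pvB_removeFirst_length (f : Int × Int → Bool) (l r : List (Int × Int))
    (h : pvB_removeFirst f l = some r) : r.length + 1 = l.length := by
  induction l generalizing r with
  | nil => simp [pvB_removeFirst] at h
  | cons p rest ih =>
    simp only [pvB_removeFirst] at h
    by_cases hp : f p
    · simp [hp] at h; simp [← h]
    · simp only [hp, Bool.false_eq_true, if_false] at h
      cases hr : pvB_removeFirst f rest with
      | none => rw [hr] at h; simp at h
      | some r' =>
        rw [hr] at h; simp at h
        have := ih r' hr
        simp [← h, List.length_cons]; omega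

theorem pv_findMatch_mem (M : PySem.Set Int) (tol : Int) (crit : String) (ts te : Int) :
    ∀ (E : List (Int × Int × Int)) (j : Int),
      pvA_findMatch M tol crit ts te E = some j → j ∈ E.map (fun x => x.1) := by
  intro E
  induction E with
  | nil => intro j h; simp [pvA_findMatch] at h
  | cons hd rest ih =>
    obtain ⟨i, p⟩ := hd
    intro j h
    simp only [pvA_findMatch] at h
    by_cases hc : PySem.Set.contains M i = true
    · rw [if_pos hc] at h
      exact List.mem_cons_of_mem _ (ih j h)
    · rw [if_neg hc] at h
      by_cases hm : pvA_isMatch tol crit ts te p.1 p.2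
      · rw [if_pos hm] at h
        simp at h
        simp [h]
      · rw [if_neg hm] at h
        exact List.mem_cons_of_mem _ (ih j h)

-- the inner scans correspond: A's first unmatched matching index vs B's delete-first-match
theorem pv_inner_corr (tol : Int) (crit : String) (ts te : Int)
    (M : PySem.Set Int) (E : List (Int × Int × Int))
    (hnd : (E.map (fun x => x.1)).Nodup) :
    (pvA_findMatch M tol crit ts te E = none ∧
      pvB_removeFirst (fun p => pvA_isMatch tol crit ts te p.1 p.2) (pvRem M E) = none) ∨
    (∃ j, pvA_findMatch M tol crit ts te E = some j ∧ j ∉ M ∧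
      pvB_removeFirst (fun p => pvA_isMatch tol crit ts te p.1 p.2) (pvRem M E) =
        some (pvRem (PySem.Set.add M j) E)) := by
  induction E with
  | nil => left; constructor <;> simp [pvA_findMatch, pvRem, pvB_removeFirst]
  | cons hd rest ih =>
    obtain ⟨i, p⟩ := hd
    simp only [List.map_cons, List.nodup_cons] at hnd
    obtain ⟨hi, hndr⟩ := hnd
    by_cases hc : i ∈ M
    · -- `continue`: index already matched; the head is absent from pvRem for any superset of M
      have hskip : ∀ (N : PySem.Set Int), i ∈ N → pvRem N ((i, p) :: rest) = pvRem N rest := by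
        intro N hN; simp [pvRem, hN]
      have hA : pvA_findMatch M tol crit ts te ((i, p) :: rest) =
          pvA_findMatch M tol crit ts te rest := by
        simp [pvA_findMatch, hc]
      rcases ih hndr with ⟨h1, h2⟩ | ⟨j, h1, hjM, h2⟩
      · left; rw [hA, hskip M hc]; exact ⟨h1, h2⟩
      · right; refine ⟨j, by rw [hA]; exact h1, hjM, ?_⟩
        rw [hskip M hc, hskip (PySem.Set.add M j) (by simp [PySem.Set.mem_add]; left; exact hc), h2]
    · have hrem : pvRem M ((i, p) :: rest) = p :: pvRem M rest := by
        simp [pvRem, hc]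
      by_cases hm : pvA_isMatch tol crit ts te p.1 p.2
      · -- match at the head: A returns i, B deletes the head
        right
        refine ⟨i, by simp [pvA_findMatch, hc, hm], hc, ?_⟩
        rw [hrem]
        simp only [pvB_removeFirst, hm, if_true]
        have hhd : pvRem (PySem.Set.add M i) ((i, p) :: rest) = pvRem (PySem.Set.add M i) rest := by
          simp [pvRem, PySem.Set.mem_add]
        rw [hhd, pvRem_add_not_mem M i rest hi]
      · -- no match at the head: both recurse, the head survives in B's list
        have hA : pvA_findMatch M tol crit ts te ((i, p) :: rest) =
            pvA_findMatch M tol crit ts te rest := by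
          simp [pvA_findMatch, hc, hm]
        rcases ih hndr with ⟨h1, h2⟩ | ⟨j, h1, hjM, h2⟩
        · left
          rw [hA, hrem]
          refine ⟨h1, ?_⟩
          simp only [pvB_removeFirst, hm, Bool.false_eq_true, if_false, h2, Option.map_none]
        · right
          have hjrest : j ∈ rest.map (fun x => x.1) := pv_findMatch_mem M tol crit ts te rest j h1
          have hji : j ≠ i := by intro e; exact hi (e ▸ hjrest)
          refine ⟨j, by rw [hA]; exact h1, hjM, ?_⟩
          rw [hrem]
          simp only [pvB_removeFirst, hm, Bool.false_eq_true, if_false, h2, Option.map_some]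
          have hij : ¬ i = j := fun e => hji (Eq.symm e)
          have : pvRem (PySem.Set.add M j) ((i, p) :: rest) = p :: pvRem (PySem.Set.add M j) rest := by
            simp [pvRem, PySem.Set.mem_add, hc, hij]
          rw [this]
  
-- the outer loops correspond: same TP, TP+FN = processed count, B's remaining = pvRem of A's set,
-- and |matched| + |remaining| is conserved
theorem pv_loop_corr (tol : Int) (crit : String) (E : List (Int × Int × Int))
    (hnd : (E.map (fun x => x.1)).Nodup) :
    ∀ (ts : List (Int × Int)) (tp fn : Int) (M : PySem.Set Int),
      (pvA_loop E tol crit ts (tp, fn, M)).1 =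
        (pvB_loop (fun t p => pvA_isMatch tol crit t.1 t.2 p.1 p.2) ts (tp, pvRem M E)).1 ∧
      (pvA_loop E tol crit ts (tp, fn, M)).2.1 + (pvA_loop E tol crit ts (tp, fn, M)).1 =
        fn + tp + (ts.length : Int) ∧
      (pvB_loop (fun t p => pvA_isMatch tol crit t.1 t.2 p.1 p.2) ts (tp, pvRem M E)).2 =
        pvRem (pvA_loop E tol crit ts (tp, fn, M)).2.2 E ∧
      (pvA_loop E tol crit ts (tp, fn, M)).2.2.length +
        (pvB_loop (fun t p => pvA_isMatch tol crit t.1 t.2 p.1 p.2) ts (tp, pvRem M E)).2.length =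
        M.length + (pvRem M E).length := by
  intro ts
  induction ts with
  | nil => intro tp fn M; simp [pvA_loop, pvB_loop]
  | cons t ts ih =>
    intro tp fn M
    rcases pv_inner_corr tol crit t.1 t.2 M E hnd with ⟨hA, hB⟩ | ⟨j, hA, hjM, hB⟩
    · have eA : pvA_loop E tol crit (t :: ts) (tp, fn, M) =
          pvA_loop E tol crit ts (tp, fn + 1, M) := by
        simp [pvA_loop, hA]
      have eB : pvB_loop (fun t p => pvA_isMatch tol crit t.1 t.2 p.1 p.2) (t :: ts) (tp, pvRem M E) =
          pvB_loop (fun t p => pvA_isMatch tol crit t.1 t.2 p.1 p.2) ts (tp, pvRem M E) := by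
        simp [pvB_loop, hB]
      obtain ⟨i1, i2, i3, i4⟩ := ih tp (fn + 1) M
      rw [eA, eB]
      refine ⟨i1, ?_, i3, i4⟩
      rw [i2]; simp only [List.length_cons]; push_cast; omega
    · have eA : pvA_loop E tol crit (t :: ts) (tp, fn, M) =
          pvA_loop E tol crit ts (tp + 1, fn, PySem.Set.add M j) := by
        simp [pvA_loop, hA]
      have eB : pvB_loop (fun t p => pvA_isMatch tol crit t.1 t.2 p.1 p.2) (t :: ts) (tp, pvRem M E) =
          pvB_loop (fun t p => pvA_isMatch tol crit t.1 t.2 p.1 p.2) ts (tp + 1, pvRem (PySem.Set.add M j) E) := by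
        simp [pvB_loop, hB]
      obtain ⟨i1, i2, i3, i4⟩ := ih (tp + 1) fn (PySem.Set.add M j)
      rw [eA, eB]
      have hlenM : (PySem.Set.add M j).length = M.length + 1 := by
        rw [PySem.Set.add_of_not_mem hjM]; simp
      have hlenR : (pvRem (PySem.Set.add M j) E).length + 1 = (pvRem M E).length :=
        pvB_removeFirst_length _ _ _ hB
      refine ⟨i1, ?_, i3, ?_⟩
      · rw [i2]; simp only [List.length_cons]; push_cast; omega
      · rw [i4, hlenM]; omega

-- the match predicate B selects once equals A's per-pair branch ladder
theorem pv_match_eq (tol : Int) (crit : String) :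
    (if crit == "tolerance" then fun (t p : Int × Int) => decide (|p.1 - t.1| ≤ tol)
     else if crit == "overlap" then fun t p => decide (min t.2 p.2 > max t.1 p.1)
     else fun _ _ => false) =
    (fun (t p : Int × Int) => pvA_isMatch tol crit t.1 t.2 p.1 p.2) := by
  funext t p
  unfold pvA_isMatch
  split_ifs <;> rfl

theorem pvRem_empty (E : List (Int × Int × Int)) :
    pvRem PySem.Set.empty E = E.map (fun x => x.2) := by
  simp [pvRem, PySem.Set.empty]

-- ===== VERDICT (by name: the statement is the Claim_ definition above) =====
theorem calculate_confusion_by_criteria_spec : Claim_equal_calculate_confusion_by_criteria := by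
  intro true_events pred_events tolerance criteria _
  unfold Spec_calculate_confusion_by_criteria
  unfold calculate_confusion_by_criteria calculate_confusion_by_criteria_alt
  rw [pv_match_eq]
  have hnd : ((PySem.List.enumerate pred_events 0).map (fun x => x.1)).Nodup := by
    rw [PySem.List.map_fst_enumerate]
    exact PySem.List.nodup_pyRange_one 0 (0 + pred_events.length)
  obtain ⟨i1, i2, i3, i4⟩ :=
    pv_loop_corr tolerance criteria (PySem.List.enumerate pred_events 0) hnd true_events 0 0
      PySem.Set.empty
  have hrem0 : pvRem PySem.Set.empty (PySem.List.enumerate pred_events 0) = pred_events := by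
    rw [pvRem_empty, PySem.List.map_snd_enumerate]
  rw [hrem0] at i1 i3 i4
  refine Prod.ext ?_ (Prod.ext ?_ ?_)
  · simpa using i1
  · simp only
    rw [← i1]
    omega
  · simp only
    have hM0 : (PySem.Set.empty : PySem.Set Int).length = 0 := rfl
    rw [hM0] at i4
    omega
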